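-- pv_equiv track=rewrite | github.com/thejasmeetsingh/Competitive-programming | hackerrank/missing_numbers.py | missingNumbers
-- ===== SOURCE A (Python) =====
-- from collections import Counter
--
-- def missingNumbers(arr, brr):
--     arr_counter = Counter(arr)
--     brr_counter = Counter(brr)
--     result = list()
--
--     for brr_count in brr_counter:
--         if (brr_count not in arr_counter) or (brr_count in arr_counter and brr_counter[brr_count] - arr_counter[brr_count] != 0):
--             result.append(brr_count)
--
--     result.sort()
--     return result
-- ===== SOURCE B (Python) =====
-- def missingNumbers(arr, brr):
--     a = sorted(arr)
--     b = sorted(brr)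
--     res = []
--     i, j = 0, 0
--     n, m = len(a), len(b)
--     while j < m:
--         v = b[j]
--         while i < n and a[i] < v:
--             i += 1
--         ca = 0
--         while i < n and a[i] == v:
--             ca += 1
--             i += 1
--         cb = 0
--         while j < m and b[j] == v:
--             cb += 1
--             j += 1
--         if ca != cb:
--             res.append(v)
--     return res
-- ===== Notes on version B (the rewrite author's own statement) =====
-- stated objective: alternative
-- what changed: Replaces the two Counter hash tables plus a final sort with a sort-first two-pointer merge over value runs of the sorted copies, emitting each value once when its run lengths differ; the result comes out sorted and distinct by construction.
import Mathlib
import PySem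

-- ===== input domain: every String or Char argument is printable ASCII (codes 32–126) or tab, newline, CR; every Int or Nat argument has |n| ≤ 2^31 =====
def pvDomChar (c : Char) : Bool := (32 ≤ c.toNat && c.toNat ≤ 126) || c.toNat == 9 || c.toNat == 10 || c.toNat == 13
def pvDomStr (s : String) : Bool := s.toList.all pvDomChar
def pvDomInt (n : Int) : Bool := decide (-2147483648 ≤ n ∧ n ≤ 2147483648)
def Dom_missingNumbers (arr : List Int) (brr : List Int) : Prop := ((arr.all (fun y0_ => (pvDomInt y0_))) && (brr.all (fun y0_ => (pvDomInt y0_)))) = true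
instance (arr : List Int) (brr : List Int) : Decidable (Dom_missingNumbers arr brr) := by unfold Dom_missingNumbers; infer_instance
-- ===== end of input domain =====

-- B replaces A's Counter dictionaries + final sort by a sort-first two-pointer merge over
-- value runs; same return value, a genuinely different traversal (objective: alternative).


-- ===== PORT A =====
def missingNumbers (arr : List Int) (brr : List Int) : List Int :=
  let arrCounter := PySem.Dict.counter arr
  let brrCounter := PySem.Dict.counter brr
  let result := brrCounter.keys.foldl (fun res k =>
    if (!arrCounter.contains k) ||
       (arrCounter.contains k && (brrCounter.getD k 0 - arrCounter.getD k 0 != 0))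
    then res ++ [k] else res) []
  PySem.List.sorted result (fun x => x) false

-- ===== PORT B =====
-- outer while over the sorted brr copy: skip smaller arr values, count both runs of the
-- current value v, emit v once iff the run lengths differ
def mnLoop (a : List Int) (b : List Int) : List Int :=
  match b with
  | [] => []
  | v :: bs =>
    let a1 := a.dropWhile (fun x => decide (x < v))
    let ca := (a1.takeWhile (fun x => x == v)).length
    let cb := ((v :: bs).takeWhile (fun x => x == v)).length
    let rest := mnLoop (a1.dropWhile (fun x => x == v)) ((v :: bs).dropWhile (fun x => x == v))
    if ca ≠ cb then v :: rest else rest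
termination_by b.length
decreasing_by
  simp only [List.dropWhile_cons, beq_self_eq_true, if_true, List.length_cons]
  exact Nat.lt_succ_of_le (List.length_dropWhile_le _ _)

def missingNumbers_alt (arr : List Int) (brr : List Int) : List Int :=
  mnLoop (PySem.List.sorted arr (fun x => x) false) (PySem.List.sorted brr (fun x => x) false)

-- ===== PRECONDITION & SPEC =====
def Spec_missingNumbers (arr : List Int) (brr : List Int) (out : List Int) : Prop := out = missingNumbers_alt arr brr
instance (arr : List Int) (brr : List Int) (out : List Int) : Decidable (Spec_missingNumbers arr brr out) := by unfold Spec_missingNumbers; infer_instance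

-- ===== CLAIM (what is proved, stated in full; the proofs are below) =====
def Claim_equal_missingNumbers : Prop := ∀ (arr : List Int) (brr : List Int), Dom_missingNumbers arr brr → Spec_missingNumbers arr brr (missingNumbers arr brr)

-- ===== LEMMAS AND PROOFS =====

-- On a ≤-sorted list, dropWhile (< v) removes exactly the elements < v.
theorem dropWhile_lt_eq_filter (v : Int) (a : List Int)
    (h : a.Pairwise (· ≤ ·)) :
    a.dropWhile (fun x => decide (x < v)) = a.filter (fun x => decide (v ≤ x)) := by
  induction a with
  | nil => rfl
  | cons x t ih =>
    rcases List.pairwise_cons.mp h with ⟨hx, ht⟩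
    by_cases hxv : x < v
    · simp [List.dropWhile_cons, List.filter_cons, hxv, not_le.mpr hxv, ih ht]
    · push_neg at hxv
      simp only [List.dropWhile_cons, List.filter_cons, decide_eq_true_eq]
      rw [if_neg (by simpa using hxv), if_pos (by simpa using hxv)]
      rw [List.filter_eq_self.mpr]
      intro y hy
      simpa using le_trans hxv (hx y hy)

-- On a ≤-sorted list whose elements are all ≥ v, the run of v's at the front is all of them.
theorem run_head (v : Int) (w : List Int) (h : w.Pairwise (· ≤ ·)) (hge : ∀ x ∈ w, v ≤ x) :
    (w.takeWhile (fun x => x == v)).length = w.count v ∧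
    w.dropWhile (fun x => x == v) = w.filter (fun x => decide (v < x)) := by
  induction w with
  | nil => simp
  | cons x t ih =>
    rcases List.pairwise_cons.mp h with ⟨hx, ht⟩
    by_cases hxv : x = v
    · subst hxv
      have hrec := ih ht (fun y hy => hge y (List.mem_cons_of_mem _ hy))
      simp only [List.takeWhile_cons, List.dropWhile_cons, beq_self_eq_true, if_true,
        List.length_cons, List.count_cons, List.filter_cons]
      constructor
      · simp [hrec.1]
      · rw [hrec.2]; simp
    · have hvlt : v < x := lt_of_le_of_ne (hge x (List.mem_cons_self)) (Ne.symm hxv)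
      have hxb : (x == v) = false := by simp [hxv]
      have htk : (x :: t).takeWhile (fun y => y == v) = [] := by
        simp [List.takeWhile_cons, hxb]
      have hdw : (x :: t).dropWhile (fun y => y == v) = x :: t := by
        simp [List.dropWhile_cons, hxb]
      constructor
      · rw [htk]
        have : (x :: t).count v = 0 := by
          rw [List.count_eq_zero]
          intro hv
          rcases List.mem_cons.mp hv with h1 | h1
          · exact hxv h1.symm
          · exact absurd (hx v h1) (not_le.mpr hvlt)
        simp [this]
      · rw [hdw, Eq.comm, List.filter_eq_self]
        intro y hy
        rcases List.mem_cons.mp hy with h1 | h1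
        · simpa [h1] using hvlt
        · simpa using lt_of_lt_of_le hvlt (hx y h1)

-- count through a (v < x) filter
theorem count_filter_gt (v u : Int) (l : List Int) :
    (l.filter (fun x => decide (v < x))).count u = if v < u then l.count u else 0 := by
  induction l with
  | nil => simp
  | cons x t ih =>
    by_cases hvx : v < x
    · simp only [List.filter_cons, hvx, decide_true, if_true, List.count_cons, ih]
      by_cases hxu : x = u
      · subst hxu; simp [hvx]
      · simp [hxu]
    · have h1 : (decide (v < x)) = false := by simp [hvx]
      simp only [List.filter_cons, h1, Bool.false_eq_true, if_false, ih]
      by_cases hvu : v < u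
      · have hxu : (x == u) = false := by
          simp only [beq_eq_false_iff_ne]; rintro rfl; exact hvx hvu
        simp [hvu, List.count_cons, hxu]
      · simp [hvu]

-- count through a (v <= x) filter
theorem count_filter_ge (v u : Int) (l : List Int) :
    (l.filter (fun x => decide (v ≤ x))).count u = if v ≤ u then l.count u else 0 := by
  induction l with
  | nil => simp
  | cons x t ih =>
    by_cases hvx : v ≤ x
    · simp only [List.filter_cons, hvx, decide_true, if_true, List.count_cons, ih]
      by_cases hxu : x = u
      · subst hxu; simp [hvx]
      · simp [hxu]
    · have h1 : (decide (v ≤ x)) = false := by simp [hvx]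
      simp only [List.filter_cons, h1, Bool.false_eq_true, if_false, ih]
      by_cases hvu : v ≤ u
      · have hxu : (x == u) = false := by
          simp only [beq_eq_false_iff_ne]; rintro rfl; exact hvx hvu
        simp [hvu, List.count_cons, hxu]
      · simp [hvu]

-- Main characterisation of mnLoop on two ≤-sorted lists: strictly increasing output,
-- containing exactly the values of b whose multiplicities in b and a differ.
theorem mnLoop_spec (n : Nat) : ∀ (b a : List Int), b.length ≤ n →
    a.Pairwise (· ≤ ·) → b.Pairwise (· ≤ ·) →
    (mnLoop a b).Pairwise (· < ·) ∧
    (∀ u, u ∈ mnLoop a b ↔ u ∈ b ∧ b.count u ≠ a.count u) := by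
  induction n with
  | zero =>
    intro b a hlen ha hb
    have : b = [] := List.eq_nil_of_length_eq_zero (Nat.le_zero.mp hlen)
    subst this
    simp [mnLoop]
  | succ n ih =>
    intro b a hlen ha hb
    match b with
    | [] => simp [mnLoop]
    | v :: bs =>
      have hgeb : ∀ x ∈ v :: bs, v ≤ x := by
        intro x hx
        rcases List.mem_cons.mp hx with h | h
        · exact le_of_eq h.symm
        · exact (List.pairwise_cons.mp hb).1 x h
      have hA1 : a.dropWhile (fun x => decide (x < v)) = a.filter (fun x => decide (v ≤ x)) :=
        dropWhile_lt_eq_filter v a ha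
      have hA1p : (a.filter (fun x => decide (v ≤ x))).Pairwise (· ≤ ·) := ha.filter _
      have hgeA1 : ∀ x ∈ a.filter (fun x => decide (v ≤ x)), v ≤ x := by
        intro x hx; simpa using (List.mem_filter.mp hx).2
      have runA := run_head v _ hA1p hgeA1
      have runB := run_head v (v :: bs) hb hgeb
      -- the two remainders, as filters of the ORIGINAL lists
      have ha2 : (a.filter (fun x => decide (v ≤ x))).dropWhile (fun x => x == v)
          = a.filter (fun x => decide (v < x)) := by
        rw [runA.2, List.filter_filter]
        apply List.filter_congr
        intro x _
        by_cases h : v < x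
        · simp [h, le_of_lt h]
        · simp [h]
      have hb2 : (v :: bs).dropWhile (fun x => x == v) = (v :: bs).filter (fun x => decide (v < x)) :=
        runB.2
      -- run lengths are the multiplicities
      have hca : ((a.filter (fun x => decide (v ≤ x))).takeWhile (fun x => x == v)).length
          = a.count v := by
        rw [runA.1, count_filter_ge]; simp
      have hcb : (((v :: bs)).takeWhile (fun x => x == v)).length = (v :: bs).count v := runB.1
      -- recursive call
      have hlen2 : ((v :: bs).filter (fun x => decide (v < x))).length ≤ n := by
        have h0 : (decide (v < v)) = false := by simp
        have h1 := List.length_filter_le (fun x => decide (v < x)) bs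
        have h2 : (v :: bs).length = bs.length + 1 := rfl
        simp only [List.filter_cons, h0, Bool.false_eq_true, if_false]
        omega
      have IH := ih ((v :: bs).filter (fun x => decide (v < x)))
        (a.filter (fun x => decide (v < x))) hlen2 (ha.filter _) (hb.filter _)
      -- unfold one step of mnLoop
      have hstep : mnLoop a (v :: bs) =
          if (((a.filter (fun x => decide (v ≤ x))).takeWhile (fun x => x == v)).length
              ≠ (((v :: bs)).takeWhile (fun x => x == v)).length)
          then v :: mnLoop (a.filter (fun x => decide (v < x))) ((v :: bs).filter (fun x => decide (v < x)))
          else mnLoop (a.filter (fun x => decide (v < x))) ((v :: bs).filter (fun x => decide (v < x))) := by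
        rw [mnLoop]
        simp only [hA1, ha2, hb2]
      set rest := mnLoop (a.filter (fun x => decide (v < x))) ((v :: bs).filter (fun x => decide (v < x))) with hrest
      have hmemrest : ∀ u ∈ rest, v < u := by
        intro u hu
        have := ((IH.2 u).mp hu).1
        simpa using (List.mem_filter.mp this).2
      constructor
      · rw [hstep]
        split_ifs with hc
        · exact List.pairwise_cons.mpr ⟨hmemrest, IH.1⟩
        · exact IH.1
      · intro u
        rw [hstep]
        have hcnt : ∀ l : List Int, (l.filter (fun x => decide (v < x))).count u
            = if v < u then l.count u else 0 := fun l => count_filter_gt v u l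
        by_cases huv : u = v
        · subst huv
          have hunr : u ∉ rest := fun h => absurd (hmemrest u h) (lt_irrefl u)
          split_ifs with hc
          · rw [hca, hcb] at hc
            constructor
            · intro _
              refine ⟨by simp, fun h => hc ?_⟩
              omega
            · intro _
              simp
          · rw [hca, hcb] at hc
            push_neg at hc
            constructor
            · intro h; exact absurd h hunr
            · rintro ⟨-, h⟩
              exact absurd hc.symm h
        · have hmor : ∀ h : u ∈ rest ↔ u ∈ (v :: bs) ∧ (v :: bs).count u ≠ a.count u, True := fun _ => trivial
          have hiff : u ∈ rest ↔ u ∈ (v :: bs) ∧ (v :: bs).count u ≠ a.count u := by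
            rw [IH.2 u, List.mem_filter, hcnt, hcnt]
            by_cases hvu : v < u
            · simp [hvu]
            · have h1 : u ∉ (v :: bs) ∨ False := by
                by_cases hm : u ∈ (v :: bs)
                · exact absurd (lt_of_le_of_ne (hgeb u hm) (Ne.symm huv)) hvu
                · exact Or.inl hm
              rcases h1 with h1 | h1
              · simp [hvu, h1]
              · exact absurd h1 not_false
          split_ifs with hc
          · rw [List.mem_cons]
            constructor
            · rintro (h | h)
              · exact absurd h huv
              · exact hiff.mp h
            · intro h; exact Or.inr (hiff.mpr h)
          · exact hiff

-- The condition A tests for a key u of Counter(brr) is exactly "multiplicities differ".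
theorem condA_iff (arr brr : List Int) (u : Int) (hu : u ∈ brr) :
    ((!(PySem.Dict.counter arr).contains u) ||
     ((PySem.Dict.counter arr).contains u &&
      ((PySem.Dict.counter brr).getD u 0 - (PySem.Dict.counter arr).getD u 0 != 0))) = true
    ↔ brr.count u ≠ arr.count u := by
  rw [PySem.Dict.contains_counter, PySem.Dict.getD_counter, PySem.Dict.getD_counter]
  by_cases hm : u ∈ arr
  · have h1 : arr.contains u = true := by simpa using hm
    have h2 : 1 ≤ brr.count u := List.count_pos_iff.mpr hu
    simp only [h1, Bool.not_true, Bool.true_and, Bool.false_or, bne_iff_ne, ne_eq]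
    constructor
    · intro h h'; apply h; rw [h']; ring
    · intro h h'; apply h; omega
  · have h1 : arr.contains u = false := by simpa using hm
    have h2 : arr.count u = 0 := List.count_eq_zero.mpr hm
    have h3 : 1 ≤ brr.count u := List.count_pos_iff.mpr hu
    simp only [h1, Bool.not_false, Bool.false_and, Bool.true_or, true_iff, ne_eq]
    omega

-- A's loop result, as a filter of the distinct values of brr.
theorem afilter_mem (arr brr : List Int) (u : Int) :
    u ∈ (PySem.Set.ofList brr).filter (fun k =>
        ((!(PySem.Dict.counter arr).contains k) ||
         ((PySem.Dict.counter arr).contains k &&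
          ((PySem.Dict.counter brr).getD k 0 - (PySem.Dict.counter arr).getD k 0 != 0))))
    ↔ u ∈ brr ∧ brr.count u ≠ arr.count u := by
  rw [List.mem_filter]
  constructor
  · rintro ⟨h1, h2⟩
    have hub : u ∈ brr := (by simpa using h1 : u ∈ brr)
    exact ⟨hub, (condA_iff arr brr u hub).mp h2⟩
  · rintro ⟨h1, h2⟩
    exact ⟨(by simpa using h1), (condA_iff arr brr u h1).mpr h2⟩

-- B's result: strictly increasing, members are the values of brr with differing multiplicities.
theorem alt_spec (arr brr : List Int) :
    (missingNumbers_alt arr brr).Pairwise (· < ·) ∧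
    (∀ u, u ∈ missingNumbers_alt arr brr ↔ u ∈ brr ∧ brr.count u ≠ arr.count u) := by
  have hsa : (PySem.List.sorted arr (fun x => x) false).Pairwise (· ≤ ·) := by
    simpa using PySem.List.sorted_pairwise arr (fun x => x)
  have hsb : (PySem.List.sorted brr (fun x => x) false).Pairwise (· ≤ ·) := by
    simpa using PySem.List.sorted_pairwise brr (fun x => x)
  have M := mnLoop_spec (PySem.List.sorted brr (fun x => x) false).length
    (PySem.List.sorted brr (fun x => x) false) (PySem.List.sorted arr (fun x => x) false)
    le_rfl hsa hsb
  refine ⟨M.1, fun u => ?_⟩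
  rw [show missingNumbers_alt arr brr = mnLoop (PySem.List.sorted arr (fun x => x) false)
      (PySem.List.sorted brr (fun x => x) false) from rfl, M.2 u,
    PySem.List.mem_sorted,
    (PySem.List.sorted_perm brr (fun x => x) false).count_eq,
    (PySem.List.sorted_perm arr (fun x => x) false).count_eq]

-- ===== VERDICT (by name: the statement is the Claim_ definition above) =====
theorem missingNumbers_spec : Claim_equal_missingNumbers := by
  intro arr brr _
  show missingNumbers arr brr = missingNumbers_alt arr brr
  unfold missingNumbers
  simp only
  rw [PySem.Dict.keys_counter, PySem.List.foldl_append_if_eq_filter, List.nil_append]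
  apply PySem.List.sorted_eq_of_perm_of_pairwise_lt
  · -- permutation: both are nodup with the same members
    apply (List.perm_ext_iff_of_nodup ?_ ?_).mpr
    · intro u
      rw [afilter_mem arr brr u]
      exact (alt_spec arr brr).2 u
    · exact ((alt_spec arr brr).1).imp (fun h => ne_of_lt h)
    · exact (PySem.Set.nodup_ofList brr).filter _
  · simpa using (alt_spec arr brr).1
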